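-- pv_equiv track=rewrite | github.com/signalnine/tildebin | legacy/k8s_extended_resources_audit.py | is_extended_resource
-- ===== SOURCE A (Python) =====
-- EXTENDED_RESOURCE_PREFIXES = [
--     'nvidia.com/',           # NVIDIA GPUs
--     'amd.com/',              # AMD GPUs
--     'intel.com/',            # Intel devices (GPUs, FPGAs, QAT)
--     'habana.ai/',            # Habana Gaudi accelerators
--     'xilinx.com/',           # Xilinx FPGAs
--     'smarter-devices/',      # Generic device plugins
--     'devices.kubevirt.io/',  # KubeVirt devices
--     'gpu.intel.com/',        # Intel GPU plugin
--     'fpga.intel.com/',       # Intel FPGA plugin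
--     'qat.intel.com/',        # Intel QuickAssist
--     'sriov.openshift.io/',   # SR-IOV network devices
--     'openshift.io/',         # OpenShift extended resources
--     'k8s.io/',               # Kubernetes extended resources
--     'rdma/',                 # RDMA devices
--     'hugepages-',            # Hugepages (special case)
-- ]
--
-- STANDARD_RESOURCES = {'cpu', 'memory', 'ephemeral-storage', 'pods'}
--
-- def is_extended_resource(resource_name):
--     """Check if a resource name is an extended resource (not CPU/memory/pods)."""
--     if resource_name in STANDARD_RESOURCES:
--         return False
--     # Check for known extended resource prefixes
--     for prefix in EXTENDED_RESOURCE_PREFIXES: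
--         if resource_name.startswith(prefix):
--             return True
--     # Check for domain-prefixed resources (contain '/')
--     if '/' in resource_name:
--         return True
--     # Hugepages special case
--     if resource_name.startswith('hugepages-'):
--         return True
--     return False
-- ===== SOURCE B (Python) =====
-- # Simpler: every non-hugepages prefix in A's list contains '/', so the whole
-- # prefix loop collapses into the existing '/' containment test plus one
-- # startswith for hugepages. No prefix list, no loop.
-- STANDARD_RESOURCES = {'cpu', 'memory', 'ephemeral-storage', 'pods'}
--
-- def is_extended_resource(resource_name):
--     """Check if a resource name is an extended resource (not CPU/memory/pods)."""
--     if resource_name in STANDARD_RESOURCES: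
--         return False
--     return resource_name.startswith('hugepages-') or '/' in resource_name
-- ===== Notes on version B (the rewrite author's own statement) =====
-- stated objective: simpler
-- what changed: B drops the 15-element prefix list and its loop entirely: every non-hugepages prefix contains '/', so the loop is subsumed by the existing '/' containment test plus one startswith('hugepages-') check.
import Mathlib
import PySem

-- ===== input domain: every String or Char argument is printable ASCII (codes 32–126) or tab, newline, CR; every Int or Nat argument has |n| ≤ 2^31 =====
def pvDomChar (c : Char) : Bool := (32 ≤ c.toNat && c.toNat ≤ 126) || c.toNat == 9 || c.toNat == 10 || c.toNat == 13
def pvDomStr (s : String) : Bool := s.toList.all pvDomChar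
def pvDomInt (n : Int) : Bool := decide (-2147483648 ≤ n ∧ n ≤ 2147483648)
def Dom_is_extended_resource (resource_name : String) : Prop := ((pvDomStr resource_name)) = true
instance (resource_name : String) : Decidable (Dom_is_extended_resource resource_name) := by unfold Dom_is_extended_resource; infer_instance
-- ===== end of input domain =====

-- B replaces A's loop over the 15-element prefix list with a single
-- startswith('hugepages-') plus the '/' containment test (all other prefixes contain '/').

-- ===== PORT A =====
def EXTENDED_RESOURCE_PREFIXES : List String :=
  ["nvidia.com/", "amd.com/", "intel.com/", "habana.ai/", "xilinx.com/",
   "smarter-devices/", "devices.kubevirt.io/", "gpu.intel.com/", "fpga.intel.com/",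
   "qat.intel.com/", "sriov.openshift.io/", "openshift.io/", "k8s.io/",
   "rdma/", "hugepages-"]

def STANDARD_RESOURCES : PySem.Set String :=
  PySem.Set.ofList ["cpu", "memory", "ephemeral-storage", "pods"]

def is_extended_resource (resource_name : String) : Bool :=
  if PySem.Set.contains STANDARD_RESOURCES resource_name then false
  else if EXTENDED_RESOURCE_PREFIXES.any (fun prefix_ => PySem.Str.startswith resource_name prefix_) then true
  else if PySem.Str.isIn "/" resource_name then true
  else if PySem.Str.startswith resource_name "hugepages-" then true
  else false

-- ===== PORT B =====
def is_extended_resource_alt (resource_name : String) : Bool :=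
  if PySem.Set.contains STANDARD_RESOURCES resource_name then false
  else PySem.Str.startswith resource_name "hugepages-" || PySem.Str.isIn "/" resource_name

-- ===== PRECONDITION & SPEC =====
def Spec_is_extended_resource (resource_name : String) (out : Bool) : Prop := out = is_extended_resource_alt resource_name
instance (resource_name : String) (out : Bool) : Decidable (Spec_is_extended_resource resource_name out) := by unfold Spec_is_extended_resource; infer_instance

-- ===== CLAIM (what is proved, stated in full; the proofs are below) =====
def Claim_equal_is_extended_resource : Prop := ∀ (resource_name : String), Dom_is_extended_resource resource_name → Spec_is_extended_resource resource_name (is_extended_resource resource_name)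

-- ===== LEMMAS AND PROOFS =====

-- If s starts with a prefix containing '/', then '/' occurs in s.
theorem sw_slash (s p : String) (hp : '/' ∈ p.toList)
    (h : PySem.Str.startswith s p = true) : PySem.Str.isIn "/" s = true := by
  rw [PySem.Str.isIn_iff_infix]
  rw [PySem.Str.startswith_eq, PySem.Chars.startswith_iff] at h
  obtain ⟨l, r, hlr⟩ := List.append_of_mem hp
  have hinf : ("/" : String).toList <:+: p.toList := ⟨l, r, by rw [hlr]; simp⟩
  exact hinf.trans h.isInfix

theorem is_extended_resource_eq_alt (s : String) :
    is_extended_resource s = is_extended_resource_alt s := by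
  unfold is_extended_resource is_extended_resource_alt STANDARD_RESOURCES
  by_cases hstd : PySem.Set.contains (PySem.Set.ofList ["cpu", "memory", "ephemeral-storage", "pods"]) s = true
  · rw [if_pos hstd, if_pos hstd]
  · rw [if_neg hstd, if_neg hstd]
    by_cases hany : EXTENDED_RESOURCE_PREFIXES.any (fun prefix_ => PySem.Str.startswith s prefix_) = true
    · rw [if_pos hany]
      -- one of the 15 prefixes matches: either it contains '/', or it is "hugepages-"
      rw [List.any_eq_true] at hany
      obtain ⟨p, hp, hsw⟩ := hany
      symm
      unfold EXTENDED_RESOURCE_PREFIXES at hp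
      fin_cases hp
      all_goals first
        | (rw [sw_slash s _ (by decide) hsw]; simp)
        | (rw [hsw]; simp)
    · rw [if_neg hany]
      by_cases hin : PySem.Str.isIn "/" s = true
      · rw [if_pos hin, hin, Bool.or_true]
      · rw [if_neg hin]
        by_cases hh : PySem.Str.startswith s "hugepages-" = true
        · rw [if_pos hh, hh, Bool.true_or]
        · rw [if_neg hh]
          simp only [Bool.not_eq_true] at hh hin
          rw [hh, hin]; rfl

-- ===== VERDICT (by name: the statement is the Claim_ definition above) =====
theorem is_extended_resource_spec : Claim_equal_is_extended_resource := by
  intro s _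
  unfold Spec_is_extended_resource
  exact is_extended_resource_eq_alt s
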